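-- pv_equiv track=rewrite | github.com/orgithu/Classes-repo | F.NSM230-25-26A/week12/oldRSA.py | convertToChar
-- ===== SOURCE A (Python) =====
-- import string
--
-- st=list(string.ascii_lowercase+string.ascii_uppercase+"0123456789 ,;.?\n")
--
-- def convertToChar(P): #len=4
--     if len(str(P)) == 4:
--         try:
--             l = int(str(P)[2:])
--             r = int(str(P)[:2])
--             result = st[r]+st[l]
--             return str(result)
--         except:
--             pass
--     elif (len(str(P)) > 4):
--         raise ValueError("len is more than 4")
--     else:
--         a = '0' + str(P)
--         return convertToChar(a)
-- ===== SOURCE B (Python) =====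
-- import string
--
-- st = list(string.ascii_lowercase + string.ascii_uppercase + "0123456789 ,;.?\n")
--
-- def convertToChar(P):
--     s = str(P)
--     if len(s) > 4:
--         raise ValueError("len is more than 4")
--     s = s.rjust(4, '0')
--     try:
--         r = int(s[:2])
--         l = int(s[2:])
--         return st[r] + st[l]
--     except Exception:
--         return None
-- ===== Notes on version B (the rewrite author's own statement) =====
-- stated objective: simpler
-- what changed: A pads the number to 4 characters by recursing with '0' + str(P) one character at a time; B is flat: it pads once with rjust(4, '0') and runs the split-parse-lookup core a single time, with no recursion.
-- outside the precondition, e.g. on convertToChar(99): A returns None, B returns None; on convertToChar(-12): A returns None, B returns None; on convertToChar(10000): A raises ValueError, B raises ValueError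
import Mathlib
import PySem

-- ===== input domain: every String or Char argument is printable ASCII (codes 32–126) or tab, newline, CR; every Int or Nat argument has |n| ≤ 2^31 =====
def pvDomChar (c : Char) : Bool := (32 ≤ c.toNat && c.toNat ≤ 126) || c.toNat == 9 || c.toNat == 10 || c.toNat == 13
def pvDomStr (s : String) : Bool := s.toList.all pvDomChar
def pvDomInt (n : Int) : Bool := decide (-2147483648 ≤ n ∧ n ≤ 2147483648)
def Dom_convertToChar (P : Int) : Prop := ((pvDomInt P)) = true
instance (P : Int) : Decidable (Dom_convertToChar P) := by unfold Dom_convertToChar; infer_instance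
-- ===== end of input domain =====

-- B replaces A's one-'0'-at-a-time recursive padding with a single flat rjust-style pad
-- and a straight-line try block: simpler (no recursion), same values wherever A returns a string.
-- Ports conflate A's implicit `return None` and its ValueError into "" — both are outside Pre_.

-- ===== PORT A =====
-- module-level st, shared context of both Pythons
def stChars : List Char :=
  ("abcdefghijklmnopqrstuvwxyzABCDEFGHIJKLMNOPQRSTUVWXYZ0123456789 ,;.?\n").toList

-- A's try block: l = int(str(P)[2:]); r = int(str(P)[:2]); result = st[r]+st[l]; return str(result)
-- any exception (ValueError from int, IndexError from st[...]) → A falls through and returns None → `none` here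
def tryA (s : List Char) : Option String := do
  let l ← PySem.Int.ofChars? (s.drop 2)     -- s[2:] of a 4-char string
  let r ← PySem.Int.ofChars? (s.take 2)     -- s[:2]
  let cr ← PySem.List.pyGet? stChars r      -- st[r] (Python negative indexing)
  let cl ← PySem.List.pyGet? stChars l      -- st[l]
  pure (String.ofList [cr, cl])

-- A's body on the decimal string of P; recursion `return convertToChar('0' + str(P))` becomes
-- structural recursion; fuel 5 is an upper bound on the recursion depth, never reached
def convertToCharGo : Nat → List Char → Option String
  | f + 1, s =>
    if s.length = 4 then tryA s
    else if s.length > 4 then none          -- raise ValueError("len is more than 4")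
    else convertToCharGo f ('0' :: s)       -- a = '0' + str(P); return convertToChar(a)
  | 0, _ => none

-- A returns a String only where Pre_ holds; None/ValueError (outside Pre_) are rendered as ""
def convertToChar (P : Int) : String :=
  (convertToCharGo 5 (PySem.Int.toChars P)).getD ""

-- ===== PORT B =====
-- B's try block: r = int(s[:2]); l = int(s[2:]); return st[r] + st[l]
def tryB (s : List Char) : Option String := do
  let r ← PySem.Int.ofChars? (s.take 2)
  let l ← PySem.Int.ofChars? (s.drop 2)
  let cr ← PySem.List.pyGet? stChars r
  let cl ← PySem.List.pyGet? stChars l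
  pure (String.ofList [cr, cl])

def convertToChar_alt (P : Int) : String :=
  let s0 := PySem.Int.toChars P
  if s0.length > 4 then ""                  -- raise ValueError (outside Pre_)
  else
    let s := List.replicate (4 - s0.length) '0' ++ s0   -- s.rjust(4, '0')
    match tryB s with
    | some res => res
    | none => ""                            -- except: return None (outside Pre_)

-- ===== PRECONDITION & SPEC =====
-- Pre_ excludes inputs where Python A does not return a String: P with a 5+-digit decimal
-- representation (ValueError), and P where the bare `except: pass` path falls off the end
-- returning None (st index out of range, or int() failing on a padded '0-dd' string).
def Pre_convertToChar (P : Int) : Prop :=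
  (0 ≤ P ∧ P ≤ 6767 ∧ P.emod 100 ≤ 67) ∨
  (-9 ≤ P ∧ P ≤ -1) ∨
  (-999 ≤ P ∧ P ≤ -100 ∧ (-P).emod 100 ≤ 67)
instance (P : Int) : Decidable (Pre_convertToChar P) := by unfold Pre_convertToChar; infer_instance

def pvWitness_convertToChar : Int := (1234)

def Spec_convertToChar (P : Int) (out : String) : Prop := out = convertToChar_alt P
instance (P : Int) (out : String) : Decidable (Spec_convertToChar P out) := by unfold Spec_convertToChar; infer_instance

-- ===== CLAIM (what is proved, stated in full; the proofs are below) =====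
def Claim_equal_convertToChar : Prop := ∀ (P : Int), Dom_convertToChar P → Pre_convertToChar P → Spec_convertToChar P (convertToChar P)

-- ===== LEMMAS AND PROOFS =====

-- the two try blocks differ only in the order of the two int() parses
theorem tryA_eq_tryB (s : List Char) : tryA s = tryB s := by
  unfold tryA tryB
  cases PySem.Int.ofChars? (s.drop 2) <;> cases PySem.Int.ofChars? (s.take 2) <;> rfl

-- A's '0'-prepending recursion computes the try block of the fully padded string
theorem go_eq_try (fuel : Nat) (s : List Char) (hle : s.length ≤ 4)
    (hfuel : 4 - s.length < fuel) :
    convertToCharGo fuel s = tryA (List.replicate (4 - s.length) '0' ++ s) := by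
  induction fuel generalizing s with
  | zero => omega
  | succ f ih =>
    by_cases h4 : s.length = 4
    · simp [convertToCharGo, h4]
    · have hlt : s.length < 4 := by omega
      have : convertToCharGo (f + 1) s = convertToCharGo f ('0' :: s) := by
        simp [convertToCharGo, h4]; omega
      rw [this, ih ('0' :: s) (by simp; omega) (by simp; omega)]
      have hk : 4 - s.length = (4 - ('0' :: s).length) + 1 := by simp; omega
      rw [hk, List.replicate_succ', List.append_assoc]
      rfl

-- the two ports agree on EVERY input (both render A's None / ValueError as "")
theorem ports_eq (P : Int) : convertToChar P = convertToChar_alt P := by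
  unfold convertToChar convertToChar_alt
  by_cases hlen : (PySem.Int.toChars P).length > 4
  · have h4 : ¬ (PySem.Int.toChars P).length = 4 := by omega
    simp [convertToCharGo, h4, hlen]
  · have hle : (PySem.Int.toChars P).length ≤ 4 := by omega
    rw [go_eq_try 5 _ hle (by omega), tryA_eq_tryB]
    simp only [hlen, if_false]
    cases tryB (List.replicate (4 - (PySem.Int.toChars P).length) '0' ++ PySem.Int.toChars P) <;> rfl

-- ===== VERDICT (by name: the statement is the Claim_ definition above) =====
theorem convertToChar_spec : Claim_equal_convertToChar := by
  intro P _ _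
  unfold Spec_convertToChar
  exact ports_eq P
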